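-- pv_equiv track=rewrite | github.com/epicfacedood/tutor-ai-database | quick_organize_files.py | is_question_file
-- ===== SOURCE A (Python) =====
-- def is_question_file(filename):
--     """Check if a file is likely a question paper based on its name."""
--     question_keywords = [
--         'question', 'questions', 'qn', 'qns',
--         'problem', 'problems', 'exercise', 'exercises',
--         'worksheet', 'worksheets', 'assignment', 'assignments',
--         'practice', 'test', 'exam', 'quiz'
--     ]
--
--     # Convert to lowercase for case-insensitive matching
--     lower_filename = filename.lower()
--
--     # Check for question keywords
--     for keyword in question_keywords:
--         if keyword in lower_filename:
--             return True
--
--     return False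
-- ===== SOURCE B (Python) =====
-- _KEYWORDS = ('question', 'qn', 'problem', 'exercise', 'worksheet',
--              'assignment', 'practice', 'test', 'exam', 'quiz')
--
-- def is_question_file(filename):
--     """Check if a file is likely a question paper based on its name."""
--     s = filename.lower()
--     for i in range(len(s)):
--         for k in _KEYWORDS:
--             if s.startswith(k, i):
--                 return True
--     return False
-- ===== Notes on version B (the rewrite author's own statement) =====
-- stated objective: alternative
-- what changed: Instead of 16 separate keyword-in-lowercased-name substring scans, B makes one left-to-right pass over the positions of the lowercased name, testing at each position whether one of 10 irredundant keywords starts there (the plural keywords are dropped since each contains its singular).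
import Mathlib
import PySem

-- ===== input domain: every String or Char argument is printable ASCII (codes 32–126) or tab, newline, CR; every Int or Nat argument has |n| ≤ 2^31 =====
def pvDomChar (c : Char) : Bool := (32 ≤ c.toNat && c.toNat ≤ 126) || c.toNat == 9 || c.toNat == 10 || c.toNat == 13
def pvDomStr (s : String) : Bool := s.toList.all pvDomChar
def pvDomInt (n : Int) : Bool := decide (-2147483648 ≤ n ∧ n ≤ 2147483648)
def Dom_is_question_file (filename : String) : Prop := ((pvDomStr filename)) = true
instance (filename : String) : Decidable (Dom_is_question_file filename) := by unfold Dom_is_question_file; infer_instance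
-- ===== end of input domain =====

-- B replaces A's 16 per-keyword substring scans by ONE left-to-right scan of the lowercased
-- name, checking at each position whether one of 10 irredundant keywords starts there
-- (the plurals are dropped: they contain their singulars).  Objective: alternative algorithm.

-- ===== PORT A =====
def aKeywords : List String :=
  ["question", "questions", "qn", "qns",
   "problem", "problems", "exercise", "exercises",
   "worksheet", "worksheets", "assignment", "assignments",
   "practice", "test", "exam", "quiz"]

-- the 'for keyword in question_keywords: if keyword in lower_filename: return True' loop
def aLoop : List String → String → Bool
  | [], _ => false
  | k :: rest, s => if PySem.Str.isIn k s then true else aLoop rest s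

def is_question_file (filename : String) : Bool :=
  aLoop aKeywords (PySem.Str.lower filename)

-- ===== PORT B =====
def bKeywords : List (List Char) :=
  ["question".toList, "qn".toList, "problem".toList, "exercise".toList, "worksheet".toList,
   "assignment".toList, "practice".toList, "test".toList, "exam".toList, "quiz".toList]

-- the 'for i in range(len(s)): for k in _KEYWORDS: if s.startswith(k, i): return True' scan:
-- one pass over the suffixes of the lowercased name
def bScan : List Char → Bool
  | [] => false
  | c :: rest =>
      if bKeywords.any (fun k => PySem.Chars.startswith (c :: rest) k) then true
      else bScan rest

def is_question_file_alt (filename : String) : Bool :=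
  bScan (PySem.Str.lower filename).toList

-- ===== PRECONDITION & SPEC =====
def Spec_is_question_file (filename : String) (out : Bool) : Prop := out = is_question_file_alt filename
instance (filename : String) (out : Bool) : Decidable (Spec_is_question_file filename out) := by unfold Spec_is_question_file; infer_instance

-- ===== CLAIM (what is proved, stated in full; the proofs are below) =====
def Claim_equal_is_question_file : Prop := ∀ (filename : String), Dom_is_question_file filename → Spec_is_question_file filename (is_question_file filename)

-- ===== LEMMAS AND PROOFS =====

theorem aLoop_iff (ks : List String) (s : String) :
    aLoop ks s = true ↔ ∃ k ∈ ks, k.toList <:+: s.toList := by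
  induction ks with
  | nil => simp [aLoop]
  | cons k rest ih =>
      simp only [aLoop]
      split_ifs with h
      · simp only [true_iff]
        exact ⟨k, List.mem_cons_self .., (PySem.Chars.isIn_iff_infix _ _).1 (by simpa using h)⟩
      · rw [ih]
        constructor
        · rintro ⟨k', hk', hinf⟩; exact ⟨k', List.mem_cons_of_mem _ hk', hinf⟩
        · rintro ⟨k', hk', hinf⟩
          rcases List.mem_cons.1 hk' with rfl | hmem
          · exact absurd ((PySem.Chars.isIn_iff_infix _ _).2 hinf) (by simpa using h)
          · exact ⟨k', hmem, hinf⟩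

theorem bScan_iff (l : List Char) :
    bScan l = true ↔ ∃ k ∈ bKeywords, k <:+: l := by
  induction l with
  | nil =>
      constructor
      · intro h; exact absurd h (by simp [bScan])
      rintro ⟨k, hk, hinf⟩
      rw [List.infix_nil] at hinf
      subst hinf
      revert hk; decide
  | cons c rest ih =>
      simp only [bScan]
      split_ifs with h
      · simp only [true_iff]
        rcases List.any_eq_true.1 h with ⟨k, hk, hsw⟩
        exact ⟨k, hk, ((PySem.Chars.startswith_iff _ _).1 hsw).isInfix⟩
      · rw [ih]
        constructor
        · rintro ⟨k, hk, hinf⟩; exact ⟨k, hk, hinf.trans (List.suffix_cons c rest).isInfix⟩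
        · rintro ⟨k, hk, hinf⟩
          rcases List.infix_cons_iff.1 hinf with hpre | hinf'
          · exact absurd (List.any_eq_true.2 ⟨k, hk, (PySem.Chars.startswith_iff _ _).2 hpre⟩) h
          · exact ⟨k, hk, hinf'⟩

-- a plural keyword occurring in l implies its singular does
theorem keys_bridge (l : List Char) :
    (∃ k ∈ aKeywords, k.toList <:+: l) ↔ ∃ k ∈ bKeywords, k <:+: l := by
  have step : ∀ (a b : List Char), a <:+: b → b <:+: l → a <:+: l := fun _ _ h h' => h.trans h'
  constructor
  · rintro ⟨k, hk, hinf⟩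
    simp only [aKeywords, List.mem_cons, List.not_mem_nil, or_false] at hk
    simp only [bKeywords, List.mem_cons, List.not_mem_nil, or_false, exists_eq_or_imp]
    rcases hk with rfl|rfl|rfl|rfl|rfl|rfl|rfl|rfl|rfl|rfl|rfl|rfl|rfl|rfl|rfl|rfl
    · exact Or.inl hinf
    · exact Or.inl (step _ _ (by decide) hinf)
    · exact Or.inr (Or.inl hinf)
    · exact Or.inr (Or.inl (step _ _ (by decide) hinf))
    · exact Or.inr (Or.inr (Or.inl hinf))
    · exact Or.inr (Or.inr (Or.inl (step _ _ (by decide) hinf)))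
    · exact Or.inr (Or.inr (Or.inr (Or.inl hinf)))
    · exact Or.inr (Or.inr (Or.inr (Or.inl (step _ _ (by decide) hinf))))
    · exact Or.inr (Or.inr (Or.inr (Or.inr (Or.inl hinf))))
    · exact Or.inr (Or.inr (Or.inr (Or.inr (Or.inl (step _ _ (by decide) hinf)))))
    · exact Or.inr (Or.inr (Or.inr (Or.inr (Or.inr (Or.inl hinf)))))
    · exact Or.inr (Or.inr (Or.inr (Or.inr (Or.inr (Or.inl (step _ _ (by decide) hinf))))))
    · exact Or.inr (Or.inr (Or.inr (Or.inr (Or.inr (Or.inr (Or.inl hinf))))))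
    · exact Or.inr (Or.inr (Or.inr (Or.inr (Or.inr (Or.inr (Or.inr (Or.inl hinf)))))))
    · exact Or.inr (Or.inr (Or.inr (Or.inr (Or.inr (Or.inr (Or.inr (Or.inr (Or.inl hinf))))))))
    · exact Or.inr (Or.inr (Or.inr (Or.inr (Or.inr (Or.inr (Or.inr (Or.inr (Or.inr ⟨_, rfl, hinf⟩))))))))
  · rintro ⟨k, hk, hinf⟩
    simp only [bKeywords, List.mem_cons, List.not_mem_nil, or_false] at hk
    rcases hk with rfl|rfl|rfl|rfl|rfl|rfl|rfl|rfl|rfl|rfl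
    · exact ⟨"question", by simp [aKeywords], hinf⟩
    · exact ⟨"qn", by simp [aKeywords], hinf⟩
    · exact ⟨"problem", by simp [aKeywords], hinf⟩
    · exact ⟨"exercise", by simp [aKeywords], hinf⟩
    · exact ⟨"worksheet", by simp [aKeywords], hinf⟩
    · exact ⟨"assignment", by simp [aKeywords], hinf⟩
    · exact ⟨"practice", by simp [aKeywords], hinf⟩
    · exact ⟨"test", by simp [aKeywords], hinf⟩
    · exact ⟨"exam", by simp [aKeywords], hinf⟩
    · exact ⟨"quiz", by simp [aKeywords], hinf⟩

-- ===== VERDICT (by name: the statement is the Claim_ definition above) =====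
theorem is_question_file_spec : Claim_equal_is_question_file := by
  intro filename _
  unfold Spec_is_question_file is_question_file is_question_file_alt
  rw [Bool.eq_iff_iff, aLoop_iff, bScan_iff]
  exact keys_bridge _
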